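-- pv_equiv track=rewrite | github.com/kuznetsovvj/education | algorithms/codeforces/1646b.py | solution
-- ===== SOURCE A (Python) =====
-- def solution(seq):
--     seq.sort()
--     mn = seq[0] + seq[1]
--     mx = seq[-1]
--     if mn < mx:
--         return "YES"
--     for k in range((len(seq) - 3) // 2):
--         mn += seq[2+k]
--         mx += seq[-2-k]
--         if mn < mx:
--             return "YES"
--     return "NO"
-- ===== SOURCE B (Python) =====
-- def solution(seq):
--     # Return-value equivalence; like A, sorts seq in place.
--     seq.sort()
--     n = len(seq)
--     m = max(1, (n - 1) // 2)
--     return "YES" if sum(seq[:m + 1]) < sum(seq[-m:]) else "NO"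
-- ===== Notes on version B (the rewrite author's own statement) =====
-- stated objective: simpler
-- what changed: A scans every admissible split size m with two running accumulators and early exit; B proves on the sorted list that the test is monotone in m and performs a single check at the largest admissible split size m = max(1,(n-1)//2), comparing the sum of the m+1 smallest with the sum of the m largest via slices.
import Mathlib
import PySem

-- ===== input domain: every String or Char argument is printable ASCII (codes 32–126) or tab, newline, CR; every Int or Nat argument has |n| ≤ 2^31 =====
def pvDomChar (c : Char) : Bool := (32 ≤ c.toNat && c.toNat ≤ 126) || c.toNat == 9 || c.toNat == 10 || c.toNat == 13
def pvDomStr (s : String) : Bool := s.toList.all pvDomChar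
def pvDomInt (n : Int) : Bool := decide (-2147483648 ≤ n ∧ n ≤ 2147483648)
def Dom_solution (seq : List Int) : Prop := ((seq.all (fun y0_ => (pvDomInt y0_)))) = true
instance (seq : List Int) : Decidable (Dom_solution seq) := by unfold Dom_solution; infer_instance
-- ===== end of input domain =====

-- B replaces A's scan over all split sizes by a single check of the largest admissible
-- split size (valid on the sorted list by monotonicity); return-value equivalence only —
-- both A and B sort seq in place in Python.

-- ===== PORT A =====
def solutionLoopA (s : List Int) (mn mx : Int) : List Int → String
  | [] => "NO"
  | k :: ks =>
    let mn' := mn + PySem.List.pyGetD s (2 + k) 0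
    let mx' := mx + PySem.List.pyGetD s (-2 - k) 0
    if mn' < mx' then "YES" else solutionLoopA s mn' mx' ks

def solution (seq : List Int) : String :=
  let s := PySem.List.sorted seq (fun x => x) false
  let mn := PySem.List.pyGetD s 0 0 + PySem.List.pyGetD s 1 0
  let mx := PySem.List.pyGetD s (-1) 0
  if mn < mx then "YES"
  else solutionLoopA s mn mx
    (PySem.List.pyRange 0 (PySem.Int.floordiv ((s.length : Int) - 3) 2) 1)

-- ===== PORT B =====
def solution_alt (seq : List Int) : String :=
  let s := PySem.List.sorted seq (fun x => x) false
  let n : Int := s.length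
  let m : Int := max 1 (PySem.Int.floordiv (n - 1) 2)
  if (PySem.List.slice s none (some (m + 1))).sum < (PySem.List.slice s (some (-m)) none).sum
  then "YES" else "NO"

-- ===== PRECONDITION & SPEC =====
-- Pre_ excludes only lists of fewer than two elements, on which A raises IndexError.
def Pre_solution (seq : List Int) : Prop := 2 ≤ seq.length
instance (seq : List Int) : Decidable (Pre_solution seq) := by unfold Pre_solution; infer_instance
def pvWitness_solution : List Int := [3, 1, 2]

def Spec_solution (seq : List Int) (out : String) : Prop := out = solution_alt seq
instance (seq : List Int) (out : String) : Decidable (Spec_solution seq out) := by unfold Spec_solution; infer_instance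

-- ===== CLAIM (what is proved, stated in full; the proofs are below) =====
def Claim_equal_solution : Prop := ∀ (seq : List Int), Dom_solution seq → Pre_solution seq → Spec_solution seq (solution seq)

-- ===== LEMMAS AND PROOFS =====

/-- `P s m`: the sum of the `m+1` smallest elements is < the sum of the `m` largest. -/
def Pcond (s : List Int) (m : Nat) : Prop :=
  (s.take (m + 1)).sum < (s.drop (s.length - m)).sum

lemma sum_take_succ_eq (s : List Int) (a : Nat) (h : a < s.length) :
    (s.take (a + 1)).sum = (s.take a).sum + s[a] :=
  List.sum_take_succ s a h

lemma sum_drop_eq (s : List Int) (a : Nat) (h : a < s.length) :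
    (s.drop a).sum = s[a] + (s.drop (a + 1)).sum := by
  conv_lhs => rw [← List.getElem_cons_drop h]
  rw [List.sum_cons]

lemma Pcond_mono (s : List Int) (hp : s.Pairwise (· ≤ ·)) (m : Nat)
    (hm : 2 * m + 3 ≤ s.length) (h : Pcond s m) : Pcond s (m + 1) := by
  unfold Pcond at *
  have h1 : m + 1 < s.length := by omega
  have h2 : s.length - m - 1 < s.length := by omega
  rw [sum_take_succ_eq s (m + 1) h1,
    show s.length - (m + 1) = s.length - m - 1 by omega,
    sum_drop_eq s (s.length - m - 1) h2,
    show s.length - m - 1 + 1 = s.length - m by omega]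
  have hle : s[m + 1] ≤ s[s.length - m - 1] :=
    List.pairwise_iff_getElem.mp hp _ _ h1 h2 (by omega)
  omega

lemma Pcond_climb (s : List Int) (hp : s.Pairwise (· ≤ ·)) :
    ∀ (d m : Nat), 2 * (m + d) + 1 ≤ s.length → Pcond s m → Pcond s (m + d) := by
  intro d
  induction d with
  | zero => intro m _ h; simpa using h
  | succ d ih =>
    intro m hb h
    exact Pcond_mono s hp (m + d) (by omega) (ih m (by omega) h)

lemma loopA_two_valued (s : List Int) (mn mx : Int) (ks : List Int) :
    solutionLoopA s mn mx ks = "YES" ∨ solutionLoopA s mn mx ks = "NO" := by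
  induction ks generalizing mn mx with
  | nil => right; rfl
  | cons k ks ih =>
    simp only [solutionLoopA]
    split
    · left; rfl
    · exact ih _ _

lemma loopA_yes_iff (s : List Int) (K : Nat) (hK : 2 * K + 3 ≤ s.length) :
    ∀ (d k : Nat), K = k + d →
    (solutionLoopA s ((s.take (k + 2)).sum) ((s.drop (s.length - 1 - k)).sum)
        (PySem.List.pyRange (k : Int) (K : Int) 1) = "YES"
      ↔ ∃ m, k + 2 ≤ m ∧ m ≤ K + 1 ∧ Pcond s m) := by
  intro d
  induction d with
  | zero =>
    intro k hk
    subst hk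
    rw [PySem.List.pyRange_one_eq_nil (by omega)]
    simp only [solutionLoopA]
    constructor
    · intro h; exact absurd h (by decide)
    · rintro ⟨m, h1, h2, _⟩; omega
  | succ d ih =>
    intro k hk
    have hkK : k < K := by omega
    have hk2 : k + 2 < s.length := by omega
    rw [PySem.List.pyRange_one_cons (by exact_mod_cast hkK)]
    simp only [solutionLoopA]
    have hmn : (s.take (k + 2)).sum + PySem.List.pyGetD s (2 + (k : Int)) 0
        = (s.take (k + 3)).sum := by
      rw [show (2 + (k : Int)) = ((k + 2 : Nat) : Int) by push_cast; ring,
        PySem.List.pyGetD_natCast]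
      rw [show (k + 3) = (k + 2) + 1 by ring, sum_take_succ_eq s (k + 2) hk2]
      rw [List.getD_eq_getElem?_getD, List.getElem?_eq_getElem hk2]
      rfl
    have hmx : (s.drop (s.length - 1 - k)).sum + PySem.List.pyGetD s (-2 - (k : Int)) 0
        = (s.drop (s.length - 2 - k)).sum := by
      rw [show (-2 - (k : Int)) = -((k + 2 : Nat) : Int) by push_cast; ring,
        PySem.List.pyGetD_neg_natCast s (k + 2) 0 (by omega) (by omega)]
      rw [show s.length - 2 - k = s.length - (k + 2) by omega,
        sum_drop_eq s (s.length - (k + 2)) (by omega),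
        show s.length - (k + 2) + 1 = s.length - 1 - k by omega]
      ring
    rw [hmn, hmx]
    have hP : ((s.take (k + 3)).sum < (s.drop (s.length - 2 - k)).sum) ↔ Pcond s (k + 2) := by
      unfold Pcond
      rw [show (k + 2) + 1 = k + 3 by ring, show s.length - (k + 2) = s.length - 2 - k by omega]
    split
    · rename_i hyes
      constructor
      · intro _; exact ⟨k + 2, by omega, by omega, hP.mp hyes⟩
      · intro _; rfl
    · rename_i hno
      have := ih (k + 1) (by omega)
      rw [show ((k : Int) + 1) = ((k + 1 : Nat) : Int) by push_cast; ring,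
        show s.length - 2 - k = s.length - 1 - (k + 1) by omega,
        show k + 3 = (k + 1) + 2 by ring] at *
      rw [this]
      constructor
      · rintro ⟨m, h1, h2, h3⟩; exact ⟨m, by omega, h2, h3⟩
      · rintro ⟨m, h1, h2, h3⟩
        refine ⟨m, ?_, h2, h3⟩
        rcases Nat.eq_or_lt_of_le h1 with h | h
        · exact absurd (hP.mpr (h ▸ h3)) hno
        · omega

lemma solution_eq_alt (seq : List Int) (h2 : 2 ≤ seq.length) :
    solution seq = solution_alt seq := by
  unfold solution solution_alt
  dsimp only
  set s := PySem.List.sorted seq (fun x => x) false with hs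
  have hlen : s.length = seq.length := PySem.List.length_sorted ..
  have hp : s.Pairwise (· ≤ ·) := by
    have := PySem.List.sorted_pairwise (xs := seq) (key := fun x => x)
    simpa using this
  have hn : 2 ≤ s.length := by omega
  have h0 : (0 : Nat) < s.length := by omega
  have h1 : (1 : Nat) < s.length := by omega
  -- the entry expressions of A in closed form
  have hmn0 : PySem.List.pyGetD s 0 0 + PySem.List.pyGetD s 1 0 = (s.take 2).sum := by
    rw [show (0 : Int) = ((0 : Nat) : Int) from rfl, PySem.List.pyGetD_natCast,
      show (1 : Int) = ((1 : Nat) : Int) from rfl, PySem.List.pyGetD_natCast]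
    rw [show (2 : Nat) = 1 + 1 from rfl, sum_take_succ_eq s 1 h1, sum_take_succ_eq s 0 h0]
    simp [List.getD_eq_getElem?_getD, List.getElem?_eq_getElem h0, List.getElem?_eq_getElem h1]
  have hmx0 : PySem.List.pyGetD s (-1) 0 = (s.drop (s.length - 1)).sum := by
    rw [show (-1 : Int) = -((1 : Nat) : Int) from rfl,
      PySem.List.pyGetD_neg_natCast s 1 0 (by omega) (by omega)]
    rw [sum_drop_eq s (s.length - 1) (by omega), show s.length - 1 + 1 = s.length by omega]
    simp
  have hP1 : ((s.take 2).sum < (s.drop (s.length - 1)).sum) ↔ Pcond s 1 := Iff.rfl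
  -- B's test is Pcond s M with M = max 1 ((n-1)/2)
  set M : Nat := max 1 ((s.length - 1) / 2) with hM
  have hMle : M ≤ s.length - 1 := by omega
  have hMint : max 1 (PySem.Int.floordiv ((s.length : Int) - 1) 2) = (M : Int) := by
    rw [show ((s.length : Int) - 1) = ((s.length - 1 : Nat) : Int) by omega]
    have hfd : PySem.Int.floordiv (((s.length - 1 : Nat)) : Int) 2
        = (((s.length - 1) / 2 : Nat) : Int) := by
      exact_mod_cast PySem.Int.floordiv_natCast (s.length - 1) 2
    rw [hfd]
    omega
  have hBtest : ((PySem.List.slice s none (some ((M : Int) + 1))).sum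
      < (PySem.List.slice s (some (-(M : Int))) none).sum) ↔ Pcond s M := by
    rw [show ((M : Int) + 1) = ((M + 1 : Nat) : Int) by push_cast; ring,
      PySem.List.slice_to_natCast, PySem.List.slice_from_neg_natCast s M (by omega)]
    exact Iff.rfl
  rw [hmn0, hmx0, hMint]
  -- A = "YES" ↔ ∃ m ∈ [1, M], Pcond s m; then collapse to Pcond s M
  by_cases hPM : Pcond s M
  · -- both sides "YES"
    have hBy : (if (PySem.List.slice s none (some ((M : Int) + 1))).sum
        < (PySem.List.slice s (some (-(M : Int))) none).sum then "YES" else "NO") = "YES" := by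
      rw [if_pos (hBtest.mpr hPM)]
    rw [hBy]
    by_cases hP1' : Pcond s 1
    · rw [if_pos (hP1.mpr hP1')]
    · rw [if_neg (fun h => hP1' (hP1.mp h))]
      -- M = 1 would make the failed first check the whole claim, contradiction
      have hM2 : 2 ≤ M := by
        by_contra hcon
        have hM1 : M = 1 := by omega
        exact hP1' (by rwa [hM1] at hPM)
      have hn5 : 5 ≤ s.length := by rw [hM] at hM2; omega
      set K : Nat := (s.length - 3) / 2 with hKdef
      have hKn : 2 * K + 3 ≤ s.length := by rw [hKdef]; omega
      have hKM : K + 1 = M := by rw [hM, hKdef]; omega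
      have hT : PySem.Int.floordiv ((s.length : Int) - 3) 2 = (K : Int) := by
        rw [show ((s.length : Int) - 3) = ((s.length - 3 : Nat) : Int) by omega]
        exact_mod_cast PySem.Int.floordiv_natCast (s.length - 3) 2
      rw [hT]
      have hloop := loopA_yes_iff s K hKn K 0 (by omega)
      rw [show ((0 : Nat) : Int) = (0 : Int) from rfl] at hloop
      rcases loopA_two_valued s ((s.take 2).sum) ((s.drop (s.length - 1)).sum)
          (PySem.List.pyRange 0 (K : Int) 1) with hv | hv
      · simpa using hv
      · exfalso
        have : ∃ m, 0 + 2 ≤ m ∧ m ≤ K + 1 ∧ Pcond s m := ⟨M, by omega, by omega, hPM⟩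
        have := hloop.mpr (by simpa using this)
        simp only [show (s.length - 1 - 0) = s.length - 1 from rfl] at this
        rw [this] at hv
        exact absurd hv (by decide)
  · -- both sides "NO"
    have hBn : (if (PySem.List.slice s none (some ((M : Int) + 1))).sum
        < (PySem.List.slice s (some (-(M : Int))) none).sum then "YES" else "NO") = "NO" := by
      rw [if_neg (fun h => hPM (hBtest.mp h))]
    rw [hBn]
    have hclimb : ∀ m, 1 ≤ m → m ≤ M → Pcond s m → Pcond s M := by
      intro m hm1 hmM hPm
      by_cases hn3 : 3 ≤ s.length
      · have hb : 2 * M + 1 ≤ s.length := by rw [hM]; omega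
        have := Pcond_climb s hp (M - m) m (by omega) hPm
        rwa [show m + (M - m) = M by omega] at this
      · have : M = 1 := by omega
        rwa [show m = M by omega] at hPm
    have hP1' : ¬ Pcond s 1 := fun h => hPM (hclimb 1 le_rfl (by omega) h)
    rw [if_neg (fun h => hP1' (hP1.mp h))]
    by_cases hn3 : 3 ≤ s.length
    · set K : Nat := (s.length - 3) / 2 with hKdef
      have hKn : 2 * K + 3 ≤ s.length := by rw [hKdef]; omega
      have hKM : K + 1 = M := by rw [hM, hKdef]; omega
      have hT : PySem.Int.floordiv ((s.length : Int) - 3) 2 = (K : Int) := by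
        rw [show ((s.length : Int) - 3) = ((s.length - 3 : Nat) : Int) by omega]
        exact_mod_cast PySem.Int.floordiv_natCast (s.length - 3) 2
      rw [hT]
      have hloop := loopA_yes_iff s K hKn K 0 (by omega)
      rw [show ((0 : Nat) : Int) = (0 : Int) from rfl] at hloop
      simp only [show (s.length - 1 - 0) = s.length - 1 from rfl,
        show (0 + 2 : Nat) = 2 from rfl] at hloop
      rcases loopA_two_valued s ((s.take 2).sum) ((s.drop (s.length - 1)).sum)
          (PySem.List.pyRange 0 (K : Int) 1) with hv | hv
      · exfalso
        rcases hloop.mp hv with ⟨m, hm2, hmK, hPm⟩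
        exact hPM (hclimb m (by omega) (by omega) hPm)
      · exact hv
    · -- n = 2: the loop range is empty
      have hn2 : s.length = 2 := by omega
      have hT : PySem.Int.floordiv ((s.length : Int) - 3) 2 = (-1 : Int) := by
        rw [hn2]; decide
      rw [hT, PySem.List.pyRange_one_eq_nil (by decide)]
      rfl

-- ===== VERDICT (by name: the statement is the Claim_ definition above) =====
theorem solution_spec : Claim_equal_solution := by
  intro seq _ hpre
  unfold Spec_solution
  exact solution_eq_alt seq hpre
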